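-- pv_equiv track=rewrite | github.com/helensun2001/Morality_nlp_DSCI510 | src/utils/weibo_realtime_scraper.py | id2mid
-- ===== SOURCE A (Python) =====
-- def base62_decode(string,
--                   alphabet= "0123456789abcdefghijklmnopqrstuvwxyzABCDEFGHIJKLMNOPQRSTUVWXYZ"):
--     """Decode a Base X encoded string into the number
--     Arguments:
--     - `string`: The encoded string
--     - `alphabet`: The alphabet to use for encoding
--     """
--     base = len(alphabet)
--     strlen = len(string)
--     num = 0
--     idx = 0
--     for char in string:
--         power = (strlen - (idx + 1))
--         num += alphabet.index(char) * (base ** power)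
--         idx += 1
--     return num
--
-- def id2mid (id):
--     id = str (id)[::-1]
--     size = int (len (id) / 4) if len (id) % 4 == 0 else int (len (id) / 4 + 1)
--     result = []
--     for i in range (size):
--         s = id [i * 4: (i + 1) * 4][::-1]
--         s = str (base62_decode(str (s)))
--         s_len = len (s)
--         if i < size - 1 and s_len < 7:
--             s = (7 - s_len) * '0' + s
--         result.append (s)
--     result.reverse ()
--     return ''.join (result)
-- ===== SOURCE B (Python) =====
-- ALPHABET = "0123456789abcdefghijklmnopqrstuvwxyzABCDEFGHIJKLMNOPQRSTUVWXYZ"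
--
-- def base62_decode(string,
--                   alphabet=ALPHABET):
--     """Decode a base62 string by Horner accumulation."""
--     num = 0
--     for char in string:
--         num = num * len(alphabet) + alphabet.index(char)
--     return num
--
-- def id2mid(id):
--     id = str(id)
--     r = len(id) % 4
--     groups = ([id[:r]] if r else []) + [id[i:i + 4] for i in range(r, len(id), 4)]
--     parts = [str(base62_decode(g)).zfill(0 if i == 0 else 7)
--              for i, g in enumerate(groups)]
--     return ''.join(parts)
-- ===== Notes on version B (the rewrite author's own statement) =====
-- stated objective: simpler
-- what changed: B scans the id left-to-right once (leading short group first, then fixed 4-char groups) with zfill padding, eliminating A's three reversals and the i<size-1 branch, and base62_decode becomes a Horner accumulation num=num*base+index instead of summing index*base**power.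
import Mathlib
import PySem

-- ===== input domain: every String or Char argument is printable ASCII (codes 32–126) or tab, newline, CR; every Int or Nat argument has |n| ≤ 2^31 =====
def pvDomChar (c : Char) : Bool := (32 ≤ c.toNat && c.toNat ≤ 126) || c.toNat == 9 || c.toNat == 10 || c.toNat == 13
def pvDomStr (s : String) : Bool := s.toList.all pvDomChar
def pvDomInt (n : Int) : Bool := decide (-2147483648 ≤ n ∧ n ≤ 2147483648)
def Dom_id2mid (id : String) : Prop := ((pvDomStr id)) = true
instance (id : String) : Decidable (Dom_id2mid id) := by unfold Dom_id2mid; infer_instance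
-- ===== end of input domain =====

-- B re-groups the id left-to-right in one forward pass (no reversals) and decodes by Horner
-- accumulation; same return value as A on every id whose characters are all base62 digits.

def pvAlpha : List Char := "0123456789abcdefghijklmnopqrstuvwxyzABCDEFGHIJKLMNOPQRSTUVWXYZ".toList

-- ===== PORT A =====
-- base62_decode: num += alphabet.index(char) * base ** power, power = strlen-(idx+1).
-- alphabet.index(char) raises ValueError off the alphabet — excluded by Pre_id2mid
-- (the total form `(index? …).getD 0` is exact wherever Python returns).
def base62_decode (s : List Char) (alphabet : List Char) : Int :=
  let base : Int := (alphabet.length : Int)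
  let strlen : Int := (s.length : Int)
  (s.foldl (fun (st : Int × Int) c =>
      (st.1 + (((PySem.List.index? alphabet c).getD 0 : Nat) : Int)
                * base ^ (strlen - (st.2 + 1)).toNat,
       st.2 + 1)) ((0 : Int), (0 : Int))).1

-- the body of A's `for i in range(size)` loop:
-- s = id[i*4:(i+1)*4][::-1]; s = str(base62_decode(s)); pad to 7 unless last chunk
def chunkA (idl : List Char) (size i : Nat) : List Char :=
  let s := (PySem.List.slice idl (some ((i : Int) * 4)) (some (((i : Int) + 1) * 4))).reverse
  let s := PySem.Int.toChars (base62_decode s pvAlpha)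
  if i < size - 1 ∧ s.length < 7 then List.replicate (7 - s.length) '0' ++ s else s

def id2mid (id : String) : String :=
  -- id = str(id)[::-1]  (s[::-1] is reversal: PySem.Str.slice?_none_none_neg_one)
  let idl := id.toList.reverse
  -- int(len(id)/4) resp. int(len(id)/4 + 1): exact Nat division for a nonnegative length
  let size := if idl.length % 4 = 0 then idl.length / 4 else idl.length / 4 + 1
  -- for i in range(size): … result.append(s)
  let result := (List.range size).foldl (fun (res : List (List Char)) i => res ++ [chunkA idl size i]) []
  -- result.reverse(); ''.join(result)
  String.ofList (PySem.Chars.join [] result.reverse)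

-- ===== PORT B =====
-- Horner form: num = num * len(alphabet) + alphabet.index(char)
def b62Horner (s : List Char) (alphabet : List Char) : Int :=
  s.foldl (fun num c =>
    num * (alphabet.length : Int) + (((PySem.List.index? alphabet c).getD 0 : Nat) : Int)) 0

-- groups = ([id[:r]] if r else []) + [id[i:i+4] for i in range(r, len(id), 4)]
def groupsB (cs : List Char) : List (List Char) :=
  let r := cs.length % 4
  (if r = 0 then [] else [PySem.List.slice cs none (some (r : Int))]) ++
    (PySem.List.pyRange (r : Int) (cs.length : Int) 4).map
      (fun i => PySem.List.slice cs (some i) (some (i + 4)))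

-- str(base62_decode(g)).zfill(0 if i == 0 else 7)
def partB (p : Int × List Char) : List Char :=
  PySem.Chars.zfill (PySem.Int.toChars (b62Horner p.2 pvAlpha)) (if p.1 = 0 then 0 else 7)

def id2mid_alt (id : String) : String :=
  let cs := id.toList
  let parts := (PySem.List.enumerate (groupsB cs)).map partB
  String.ofList (PySem.Chars.join [] parts)

-- ===== PRECONDITION & SPEC =====
-- Pre_ excludes exactly the ids containing a character outside the base62 alphabet,
-- on which A raises ValueError (alphabet.index).
def Pre_id2mid (id : String) : Prop := (id.toList.all (fun c => pvAlpha.contains c)) = true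
instance (id : String) : Decidable (Pre_id2mid id) := by unfold Pre_id2mid; infer_instance
def pvWitness_id2mid : String := "3f2k9ZQ"

def Spec_id2mid (id : String) (out : String) : Prop := out = id2mid_alt id
instance (id : String) (out : String) : Decidable (Spec_id2mid id out) := by unfold Spec_id2mid; infer_instance

-- ===== CLAIM (what is proved, stated in full; the proofs are below) =====
def Claim_equal_id2mid : Prop := ∀ (id : String), Dom_id2mid id → Pre_id2mid id → Spec_id2mid id (id2mid id)

-- ===== LEMMAS AND PROOFS =====

-- Horner fold started at a is the fold from 0 shifted by a * L^len
lemma horner_scale (L : Int) (Dg : Char → Int) (t : List Char) (a : Int) :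
    t.foldl (fun num c => num * L + Dg c) a
      = a * L ^ t.length + t.foldl (fun num c => num * L + Dg c) 0 := by
  induction t generalizing a with
  | nil => simp
  | cons c t ih =>
    simp only [List.foldl_cons, List.length_cons]
    rw [ih (a * L + Dg c), ih (0 * L + Dg c)]
    ring

-- A's power-sum fold equals B's Horner fold (the invariant: idx + remaining = strlen)
lemma powsum_eq_horner (L : Int) (Dg : Char → Int) (N : Nat) :
    ∀ (t : List Char) (num idx : Int), idx + t.length = N →
      (t.foldl (fun (st : Int × Int) c =>
          (st.1 + Dg c * L ^ (((N : Int)) - (st.2 + 1)).toNat, st.2 + 1)) (num, idx)).1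
        = num + t.foldl (fun num c => num * L + Dg c) 0 := by
  intro t
  induction t with
  | nil => intro num idx _; simp
  | cons c t ih =>
    intro num idx h
    simp only [List.length_cons] at h
    simp only [List.foldl_cons]
    rw [ih _ (idx + 1) (by push_cast at h ⊢; omega)]
    have hpow : (((N : Int)) - (idx + 1)).toNat = t.length := by
      push_cast at h; omega
    rw [hpow, horner_scale L Dg t (0 * L + Dg c)]
    ring

lemma decode_eq (s alphabet : List Char) : base62_decode s alphabet = b62Horner s alphabet := by
  simp only [base62_decode, b62Horner]
  have h := powsum_eq_horner ((alphabet.length : Int))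
    (fun c => (((PySem.List.index? alphabet c).getD 0 : Nat) : Int)) s.length s 0 0 (by simp)
  simpa using h

lemma horner_nonneg (s alphabet : List Char) : 0 ≤ b62Horner s alphabet := by
  unfold b62Horner
  suffices h : ∀ a : Int, 0 ≤ a →
      0 ≤ s.foldl (fun num c =>
        num * (alphabet.length : Int) + (((PySem.List.index? alphabet c).getD 0 : Nat) : Int)) a from
    h 0 le_rfl
  induction s with
  | nil => intro a ha; simpa using ha
  | cons c t ih =>
    intro a ha
    simp only [List.foldl_cons]
    exact ih _ (by positivity)

lemma digitChar_mem (m : Nat) (h : m < 10) : Nat.digitChar m ∈ "0123456789".toList := by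
  interval_cases m <;> decide

lemma toDigitsCore_chars (f : Nat) :
    ∀ (n : Nat) (acc : List Char), ∀ c ∈ Nat.toDigitsCore 10 f n acc,
      c ∈ acc ∨ c ∈ "0123456789".toList := by
  induction f with
  | zero => intro n acc c hc; exact Or.inl hc
  | succ f ih =>
    intro n acc c hc
    simp only [Nat.toDigitsCore] at hc
    by_cases h10 : n / 10 = 0
    · rw [if_pos h10] at hc
      rcases List.mem_cons.1 hc with h | h
      · exact Or.inr (h ▸ digitChar_mem _ (Nat.mod_lt _ (by norm_num)))
      · exact Or.inl h
    · rw [if_neg h10] at hc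
      rcases ih _ _ _ hc with h | h
      · rcases List.mem_cons.1 h with h' | h'
        · exact Or.inr (h' ▸ digitChar_mem _ (Nat.mod_lt _ (by norm_num)))
        · exact Or.inl h'
      · exact Or.inr h

lemma toChars_digits (m : Int) (hm : 0 ≤ m) :
    ∀ c ∈ PySem.Int.toChars m, c ∈ "0123456789".toList := by
  intro c hc
  unfold PySem.Int.toChars at hc
  rw [if_neg (by omega)] at hc
  rcases toDigitsCore_chars _ _ _ _ hc with h | h
  · simp at h
  · exact h

-- A's manual left zero-pad to 7 is zfill 7 on a nonnegative decimal string
lemma pad7_eq_zfill (m : Int) (hm : 0 ≤ m) :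
    (if (PySem.Int.toChars m).length < 7
      then List.replicate (7 - (PySem.Int.toChars m).length) '0' ++ PySem.Int.toChars m
      else PySem.Int.toChars m) = PySem.Chars.zfill (PySem.Int.toChars m) 7 := by
  unfold PySem.Chars.zfill
  by_cases hlen : (PySem.Int.toChars m).length < 7
  · rw [if_pos hlen, if_neg (by omega)]
    cases hcs : PySem.Int.toChars m with
    | nil => simp
    | cons c rest =>
      have hd : c ∈ "0123456789".toList := toChars_digits m hm c (by rw [hcs]; exact List.mem_cons_self)
      have hns : ¬(c = '+' ∨ c = '-') := by rintro (rfl | rfl) <;> simp at hd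
      simp [hns]
  · rw [if_neg hlen, if_pos (by omega)]

lemma zfill_zero (cs : List Char) : PySem.Chars.zfill cs 0 = cs := by
  simp [PySem.Chars.zfill]

-- A's i-th chunk of the reversed id, re-reversed, is a forward window of the id
lemma revchunk (cs : List Char) (i : Nat) (h : 4 * i ≤ cs.length) :
    (List.take 4 (List.drop (4 * i) cs.reverse)).reverse
      = List.drop (cs.length - 4 * i - 4) (List.take (cs.length - 4 * i) cs) := by
  have h1 : List.drop (4 * i) cs.reverse = (List.take (cs.length - 4 * i) cs).reverse := by
    rw [List.reverse_take, Nat.sub_sub_self h]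
  rw [h1]
  by_cases h4 : 4 ≤ cs.length - 4 * i
  · have hlen : (List.take (cs.length - 4 * i) cs).length = cs.length - 4 * i :=
      List.length_take_of_le (by omega)
    rw [show cs.length - 4 * i - 4 = (List.take (cs.length - 4 * i) cs).length - 4 by omega,
        ← List.reverse_reverse (List.drop _ _), List.reverse_drop, hlen]
    rw [show cs.length - 4 * i - (cs.length - 4 * i - 4) = 4 by omega]
  · have hlen : (List.take (cs.length - 4 * i) cs).length ≤ 4 := by
      rw [List.length_take]; omega
    rw [show cs.length - 4 * i - 4 = 0 by omega, List.drop_zero,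
        List.take_of_length_le (by simpa using hlen), List.reverse_reverse]

-- the two part lists coincide (aux: explicit names for length, quotient, remainder, chunk count)
lemma parts_eq_aux (cs : List Char) (q r size : Nat)
    (hn : cs.length = 4 * q + r) (hr4 : r < 4)
    (hr : r = cs.length % 4)
    (hsize : size = if r = 0 then q else q + 1) :
    ((List.range size).map (fun i => chunkA cs.reverse size i)).reverse
      = (PySem.List.enumerate (groupsB cs)).map partB := by
  have hss : (r = 0 ∧ size = q) ∨ (¬ r = 0 ∧ size = q + 1) := by
    by_cases h : r = 0 <;> simp [h] at hsize <;> tauto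
  have hcnt : (if (r : Int) < (cs.length : Int)
      then (((cs.length : Int) - (r : Int) + 4 - 1) / 4).toNat else 0) = q := by
    split_ifs with h <;> omega
  have hg : groupsB cs
      = (if r = 0 then [] else [List.take r cs]) ++
        (List.range q).map (fun k => List.take 4 (List.drop (r + 4 * k) cs)) := by
    simp only [groupsB]
    rw [← hr, PySem.List.pyRange_of_pos _ _ (by norm_num : (0 : Int) < 4), hcnt, List.map_map]
    congr 1
    · split_ifs with h
      · rfl
      · rw [PySem.List.slice_to_natCast]
    · apply List.map_congr_left
      intro k _
      show PySem.List.slice cs (some ((r : Int) + 4 * (k : Int)))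
            (some ((r : Int) + 4 * (k : Int) + 4)) = _
      rw [show (r : Int) + 4 * (k : Int) = ((r + 4 * k : Nat) : Int) by push_cast [Nat.cast_add]; ring,
          show ((r + 4 * k : Nat) : Int) + 4 = ((r + 4 * k : Nat) : Int) + ((4 : Nat) : Int) by norm_num,
          PySem.List.slice_natCast_add]
  have hglen : (groupsB cs).length = size := by
    rw [hg]
    simp only [List.length_append, List.length_map, List.length_range]
    split_ifs with h <;> simp <;> omega
  apply List.ext_getElem
  · simp [hglen, PySem.List.length_enumerate]
  · intro j hj hj'
    have hjs : j < size := by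
      simpa [PySem.List.length_enumerate, hglen] using hj'
    rw [List.getElem_reverse, List.getElem_map, List.getElem_range,
        List.getElem_map, PySem.List.getElem_enumerate]
    simp only [List.length_map, List.length_range]
    set i := size - 1 - j with hi
    have h4i : 4 * i ≤ cs.length := by omega
    have hchunk : (PySem.List.slice cs.reverse (some ((i : Int) * 4)) (some (((i : Int) + 1) * 4))).reverse
        = List.drop (cs.length - 4 * i - 4) (List.take (cs.length - 4 * i) cs) := by
      rw [show ((i : Int)) * 4 = ((4 * i : Nat) : Int) by push_cast [Nat.cast_mul]; ring,
          show ((i : Int) + 1) * 4 = ((4 * i : Nat) : Int) + ((4 : Nat) : Int) by push_cast [Nat.cast_mul]; ring,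
          PySem.List.slice_natCast_add]
      exact revchunk cs i h4i
    have hgj' : (groupsB cs)[j]? = some (List.drop (cs.length - 4 * i - 4) (List.take (cs.length - 4 * i) cs)) := by
      rw [hg, show cs.length - 4 * i = (if r = 0 then 4 * j + 4 else r + 4 * j) by
            split_ifs with h0 <;> omega]
      by_cases h0 : r = 0
      · simp only [h0, if_pos, List.nil_append, List.getElem?_map]
        rw [List.getElem?_range (by omega)]
        simp only [Option.map_some]
        rw [show 4 * j + 4 - 4 = 4 * j by omega, List.drop_take,
            show 4 * j + 4 - 4 * j = 4 by omega]
        simp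
      · simp only [h0, ite_false]
        rcases Nat.eq_zero_or_pos j with rfl | hj1
        · rw [List.getElem?_append_left (by simp)]
          rw [show r + 4 * 0 = r by omega, show r - 4 = 0 by omega, List.drop_zero]
          simp
        · rw [List.getElem?_append_right (by simp; omega)]
          simp only [List.length_singleton, List.getElem?_map]
          rw [List.getElem?_range (by omega)]
          simp only [Option.map_some]
          rw [show r + 4 * j - 4 = r + 4 * (j - 1) by omega, List.drop_take,
              show r + 4 * j - (r + 4 * (j - 1)) = 4 by omega]
    have hgj : (groupsB cs)[j]'(by omega) = List.drop (cs.length - 4 * i - 4) (List.take (cs.length - 4 * i) cs) := by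
      rw [List.getElem?_eq_getElem (by omega : j < (groupsB cs).length)] at hgj'
      exact Option.some.inj hgj'
    simp only [chunkA, partB, hchunk, hgj, decode_eq]
    set m := b62Horner (List.drop (cs.length - 4 * i - 4) (List.take (cs.length - 4 * i) cs)) pvAlpha with hm
    have hm0 : 0 ≤ m := horner_nonneg _ _
    rcases Nat.eq_zero_or_pos j with rfl | hj1
    · have hnm : ¬ (i < size - 1 ∧ (PySem.Int.toChars m).length < 7) := by
        rintro ⟨hlt, -⟩
        omega
      rw [if_neg hnm, if_pos (by norm_num), zfill_zero]
    · have hi_lt : i < size - 1 := by omega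
      rw [if_neg (show ¬ ((0 : Int) + (j : Nat) = 0) by omega)]
      simp only [hi_lt, true_and]
      exact pad7_eq_zfill m hm0

lemma parts_eq (cs : List Char) :
    ((List.range (if cs.reverse.length % 4 = 0 then cs.reverse.length / 4 else cs.reverse.length / 4 + 1)).map
        (fun i => chunkA cs.reverse (if cs.reverse.length % 4 = 0 then cs.reverse.length / 4 else cs.reverse.length / 4 + 1) i)).reverse
      = (PySem.List.enumerate (groupsB cs)).map partB := by
  simp only [List.length_reverse]
  exact parts_eq_aux cs (cs.length / 4) (cs.length % 4) _ (by omega) (by omega) rfl rfl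

-- ===== VERDICT (by name: the statement is the Claim_ definition above) =====
theorem id2mid_spec : Claim_equal_id2mid := by
  intro id _ _
  show id2mid id = id2mid_alt id
  unfold id2mid id2mid_alt
  simp only [PySem.List.foldl_append_singleton_eq_map, List.nil_append]
  rw [parts_eq id.toList]
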